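-- pv_equiv track=rewrite | github.com/vinaybranham/ml | processing.py | invalidTokenCheck
-- ===== SOURCE A (Python) =====
-- specialchars = ["-", "(", ")", "+", "*", "/"]
--
-- def checkInt(string):
--     if str(int(string)) == string:
--         return True
--     else:
--         return False
--
-- def invalidTokenCheck(string):
--     proper = ""
--     temp = ""
--     for i in range(len(string)):
--         if string[i] in specialchars:
--             if not temp:
--                 proper = proper+string[i]
--                 continue
--             if checkInt(temp):
--                 proper = proper + temp
--             else:
--                 proper = proper + str(int(temp))
--             proper = proper + string[i]
--             temp = ""
--         else:
--             temp = temp + string[i]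
--         if i == len(string)-1:
--             if not temp:
--                 continue
--             proper = proper + str(int(temp))
--     return proper
-- ===== SOURCE B (Python) =====
-- specialchars = ["-", "(", ")", "+", "*", "/"]
--
-- def _tokens(s):
--     # split into single special chars and maximal runs of other chars
--     toks = []
--     while s:
--         if s[0] in specialchars:
--             toks.append(s[0])
--             s = s[1:]
--         else:
--             k = 0
--             while k < len(s) and s[k] not in specialchars:
--                 k += 1
--             toks.append(s[:k])
--             s = s[k:]
--     return toks
--
-- def invalidTokenCheck(string):
--     return "".join(t if t in specialchars else str(int(t)) for t in _tokens(string))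
-- ===== Notes on version B (the rewrite author's own statement) =====
-- stated objective: idiomatic
-- what changed: Replaces A's single-pass index loop with accumulator state, an in-loop end-of-string flush and the redundant checkInt branch (both branches append str(int(temp))) by a two-phase tokenize/map/join pipeline: split the string into special-char and run tokens, normalize each run with str(int(run)), join.
import Mathlib
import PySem

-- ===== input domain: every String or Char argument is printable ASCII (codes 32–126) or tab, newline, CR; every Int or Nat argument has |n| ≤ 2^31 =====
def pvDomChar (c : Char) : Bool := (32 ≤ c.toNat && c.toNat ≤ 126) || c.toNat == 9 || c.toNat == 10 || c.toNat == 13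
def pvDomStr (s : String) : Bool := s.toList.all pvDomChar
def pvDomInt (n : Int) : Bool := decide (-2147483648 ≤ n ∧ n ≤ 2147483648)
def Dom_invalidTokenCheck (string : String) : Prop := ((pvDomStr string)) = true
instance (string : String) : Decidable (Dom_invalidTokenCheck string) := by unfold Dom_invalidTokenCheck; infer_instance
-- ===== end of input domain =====

-- B replaces A's per-char accumulator-with-checkInt scan by a tokenize/map/join pipeline (idiomatic, same cost).

-- ===== PORT A =====
-- specialchars = ["-", "(", ")", "+", "*", "/"]  (membership tested on single chars)
def pvSpecial : List Char := ['-', '(', ')', '+', '*', '/']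

-- the for-loop of A; Option = ValueError from int(temp); the end-of-string flush of the
-- last iteration is performed in place of the recursive call when `rest = []`.
def pvLoopA : List Char → List Char → List Char → Option (List Char)
  | [], proper, _ => some proper
  | c :: rest, proper, temp =>
    if pvSpecial.contains c then
      if temp = [] then
        pvLoopA rest (proper ++ [c]) temp          -- continue (skips the end check)
      else
        match PySem.Int.ofChars? temp with         -- int(temp) inside checkInt / str(int(temp))
        | none => none
        | some n =>
          -- checkInt(temp): str(int(temp)) == temp
          let proper1 := (if PySem.Int.toChars n = temp then proper ++ temp
                          else proper ++ PySem.Int.toChars n) ++ [c]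
          pvLoopA rest proper1 []                  -- end check is a no-op: temp == ""
    else
      let temp1 := temp ++ [c]
      if rest = [] then                            -- i == len(string)-1, temp nonempty
        match PySem.Int.ofChars? temp1 with
        | none => none
        | some n => some (proper ++ PySem.Int.toChars n)
      else
        pvLoopA rest proper temp1

def invalidTokenCheck (string : String) : String :=
  String.ofList ((pvLoopA string.toList [] []).getD [])

-- ===== PORT B =====
-- _tokens: while-loop over slices = takeWhile/dropWhile of the non-special run
def pvTokens : List Char → List (List Char)
  | [] => []
  | c :: rest =>
    if pvSpecial.contains c then [c] :: pvTokens rest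
    else ((c :: rest).takeWhile (fun x => !pvSpecial.contains x)) ::
         pvTokens ((c :: rest).dropWhile (fun x => !pvSpecial.contains x))
termination_by cs => cs.length
decreasing_by
  · simp
  · rw [List.dropWhile_cons_of_pos (by simp_all)]
    have := List.length_dropWhile_le (fun x => !pvSpecial.contains x) rest
    simp only [List.length_cons]
    omega

-- `t if t in specialchars else str(int(t))` for one token
def pvNormTok : List Char → Option (List Char)
  | t =>
    if (match t with | [c] => pvSpecial.contains c | _ => false) then some t
    else (PySem.Int.ofChars? t).map PySem.Int.toChars

-- "".join of the mapped tokens (Option = ValueError)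
def pvJoinB : List (List Char) → Option (List Char)
  | [] => some []
  | t :: ts => do
    let a ← pvNormTok t
    let b ← pvJoinB ts
    pure (a ++ b)

def invalidTokenCheck_alt (string : String) : String :=
  String.ofList ((pvJoinB (pvTokens string.toList)).getD [])

-- ===== PRECONDITION & SPEC =====
-- Pre_: every maximal run of non-special characters is a valid argument of int()
-- (exactly the inputs where the Python A returns instead of raising ValueError).
def Pre_invalidTokenCheck (string : String) : Prop :=
  ∀ t ∈ string.toList.splitOnP (fun c => pvSpecial.contains c),
    t ≠ [] → (PySem.Int.ofChars? t).isSome = true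
instance (string : String) : Decidable (Pre_invalidTokenCheck string) := by
  unfold Pre_invalidTokenCheck; infer_instance

def pvWitness_invalidTokenCheck : String := "10+ 07*(2)-1_5"

def Spec_invalidTokenCheck (string : String) (out : String) : Prop := out = invalidTokenCheck_alt string
instance (string : String) (out : String) : Decidable (Spec_invalidTokenCheck string out) := by unfold Spec_invalidTokenCheck; infer_instance

-- ===== CLAIM (what is proved, stated in full; the proofs are below) =====
def Claim_equal_invalidTokenCheck : Prop := ∀ (string : String), Dom_invalidTokenCheck string → Pre_invalidTokenCheck string → Spec_invalidTokenCheck string (invalidTokenCheck string)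

-- ===== LEMMAS AND PROOFS =====

-- main invariant: from state (proper, temp) — temp a run of non-special chars — A's loop
-- computes proper ++ (B's pipeline applied to temp ++ cs); at cs = [] only temp = [] occurs.
-- the token predicate of pvTokens
theorem pvTakeWhile_run (run : List Char) (h : ∀ x ∈ run, x ∉ pvSpecial) :
    ∀ c rest, c ∈ pvSpecial →
      (run ++ c :: rest).takeWhile (fun x => !pvSpecial.contains x) = run ∧
      (run ++ c :: rest).dropWhile (fun x => !pvSpecial.contains x) = c :: rest := by
  induction run with
  | nil => intro c rest hc; simp [hc]
  | cons d ds ih =>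
    intro c rest hc
    have hd : d ∉ pvSpecial := h d (by simp)
    have h2 := ih (fun x hx => h x (by simp [hx])) c rest hc
    simp only [List.contains_eq_mem] at h2
    simp [hd, h2.1, h2.2]

theorem pvTokens_special (c : Char) (rest : List Char) (hc : c ∈ pvSpecial) :
    pvTokens (c :: rest) = [c] :: pvTokens rest := by
  simp [pvTokens, hc]

theorem pvTokens_run_special (run : List Char) (hne : run ≠ [])
    (h : ∀ x ∈ run, x ∉ pvSpecial) (c : Char) (rest : List Char)
    (hc : c ∈ pvSpecial) :
    pvTokens (run ++ c :: rest) = run :: pvTokens (c :: rest) := by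
  obtain ⟨d, ds, rfl⟩ := List.exists_cons_of_ne_nil hne
  have hd : d ∉ pvSpecial := h d (by simp)
  have hT := pvTakeWhile_run (d :: ds) h c rest hc
  rw [List.cons_append, pvTokens]
  rw [if_neg (by simpa using hd)]
  rw [← List.cons_append, hT.1, hT.2]

theorem pvTokens_run (run : List Char) (hne : run ≠ [])
    (h : ∀ x ∈ run, x ∉ pvSpecial) :
    pvTokens run = [run] := by
  obtain ⟨d, ds, rfl⟩ := List.exists_cons_of_ne_nil hne
  have hd : d ∉ pvSpecial := h d (by simp)
  have hT : (d :: ds).takeWhile (fun x => !pvSpecial.contains x) = d :: ds := by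
    rw [List.takeWhile_eq_self_iff]
    intro x hx; simpa using h x hx
  have hD : (d :: ds).dropWhile (fun x => !pvSpecial.contains x) = [] := by
    rw [List.dropWhile_eq_nil_iff]
    intro x hx; simpa using h x hx
  rw [pvTokens]
  rw [if_neg (by simpa using hd)]
  rw [hT, hD, pvTokens]

-- a nonempty all-non-special token is never the single-special case of pvNormTok
theorem pvNormTok_run (run : List Char) (hne : run ≠ [])
    (h : ∀ x ∈ run, x ∉ pvSpecial) :
    pvNormTok run = (PySem.Int.ofChars? run).map PySem.Int.toChars := by
  unfold pvNormTok
  rw [if_neg]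
  match run, hne with
  | [d], _ => simpa using h d (by simp)
  | d :: e :: ds, _ => simp

-- main invariant: from state (proper, temp) — temp a run of non-special chars — A's loop
-- computes proper ++ (B's pipeline applied to temp ++ cs); at cs = [] only temp = [] occurs.
theorem pvLoopA_eq (cs : List Char) : ∀ proper temp,
    (∀ c ∈ temp, c ∉ pvSpecial) → (cs ≠ [] ∨ temp = []) →
    pvLoopA cs proper temp = (pvJoinB (pvTokens (temp ++ cs))).map (proper ++ ·) := by
  induction cs with
  | nil =>
    intro proper temp h hc
    have ht : temp = [] := by tauto
    subst ht
    simp [pvLoopA, pvTokens, pvJoinB]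
  | cons c rest ih =>
    intro proper temp htemp _
    by_cases hc : c ∈ pvSpecial
    · by_cases ht : temp = []
      · subst ht
        rw [List.nil_append, pvTokens_special c rest hc]
        rw [show pvLoopA (c :: rest) proper [] = pvLoopA rest (proper ++ [c]) [] by
          simp [pvLoopA, hc]]
        rw [ih (proper ++ [c]) [] (by simp) (by simp)]
        have hn : pvNormTok [c] = some [c] := by simp [pvNormTok, hc]
        simp only [List.nil_append, pvJoinB, hn]
        cases pvJoinB (pvTokens rest) <;> simp
      · rw [pvTokens_run_special temp ht htemp c rest hc, pvTokens_special c rest hc]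
        have hn := pvNormTok_run temp ht htemp
        have hn1 : pvNormTok [c] = some [c] := by simp [pvNormTok, hc]
        cases hint : PySem.Int.ofChars? temp with
        | none =>
          rw [show pvLoopA (c :: rest) proper temp = none by
            simp [pvLoopA, hc, ht, hint]]
          simp [pvJoinB, hn, hint]
        | some n =>
          have hstep : pvLoopA (c :: rest) proper temp =
              pvLoopA rest (proper ++ PySem.Int.toChars n ++ [c]) [] := by
            simp only [pvLoopA, hint]
            rw [if_pos (by simpa using hc), if_neg ht]
            congr 1
            by_cases he : PySem.Int.toChars n = temp
            · rw [if_pos he, ← he]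
            · rw [if_neg he]
          rw [hstep, ih (proper ++ PySem.Int.toChars n ++ [c]) [] (by simp) (by simp)]
          simp only [List.nil_append, pvJoinB, hn, hn1, hint, Option.map_some]
          cases pvJoinB (pvTokens rest) <;> simp [List.append_assoc]
    · by_cases hr : rest = []
      · subst hr
        have hrun : ∀ x ∈ temp ++ [c], x ∉ pvSpecial := by
          intro x hx
          rcases List.mem_append.mp hx with hx | hx
          · exact htemp x hx
          · simp at hx; subst hx; exact hc
        rw [show temp ++ [c] = temp ++ c :: ([] : List Char) from rfl,
          pvTokens_run (temp ++ [c]) (by simp) hrun]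
        have hn := pvNormTok_run (temp ++ [c]) (by simp) hrun
        cases hint : PySem.Int.ofChars? (temp ++ [c]) with
        | none =>
          rw [show pvLoopA [c] proper temp = none by simp [pvLoopA, hc, hint]]
          simp [pvJoinB, hn, hint]
        | some n =>
          rw [show pvLoopA [c] proper temp = some (proper ++ PySem.Int.toChars n) by
            simp [pvLoopA, hc, hint]]
          simp [pvJoinB, hn, hint]
      · have hrun : ∀ x ∈ temp ++ [c], x ∉ pvSpecial := by
          intro x hx
          rcases List.mem_append.mp hx with hx | hx
          · exact htemp x hx
          · simp at hx; subst hx; exact hc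
        rw [show pvLoopA (c :: rest) proper temp = pvLoopA rest proper (temp ++ [c]) by
          simp [pvLoopA, hc, hr]]
        rw [ih proper (temp ++ [c]) hrun (Or.inl hr)]
        simp [List.append_assoc]

theorem invalidTokenCheck_eq (s : String) :
    invalidTokenCheck s = invalidTokenCheck_alt s := by
  have h := pvLoopA_eq s.toList [] [] (by simp) (by
    rcases s.toList with _ | _ <;> simp)
  simp only [invalidTokenCheck, invalidTokenCheck_alt, h, List.nil_append]
  cases pvJoinB (pvTokens s.toList) <;> simp

-- ===== VERDICT (by name: the statement is the Claim_ definition above) =====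
theorem invalidTokenCheck_spec : Claim_equal_invalidTokenCheck := by
  intro s _ _
  unfold Spec_invalidTokenCheck
  exact invalidTokenCheck_eq s
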